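-- pv_equiv track=rewrite | github.com/KEUMIN/algorithm_2024 | stack/77886_R.py | solution
-- ===== SOURCE A (Python) =====
-- def solution(strings):
--     def make_lexicographically_smallest(s: str) -> str:
--         stack = []
--         count_110 = 0
--
--         # 1) s에서 "110"을 모두 뽑아 개수 세기
--         for ch in s:
--             stack.append(ch)
--             if len(stack) >= 3 and stack[-3:] == ["1", "1", "0"]:
--                 del stack[-3:]
--                 count_110 += 1
--
--         remaining = "".join(stack)  # "110"을 제거하고 남은 문자열
--         insert_after = remaining.rfind("0")  # 가장 오른쪽 '0'의 위치
--         bundle_110 = "110" * count_110  # 한 번에 삽입할 "110" 묶음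
--
--         # 2) 사전순 최소가 되도록 삽입
--         if insert_after == -1:  # '0'이 없으면 맨 앞에
--             return bundle_110 + remaining
--         return (
--             remaining[: insert_after + 1] + bundle_110 + remaining[insert_after + 1 :]
--         )
--
--     return [make_lexicographically_smallest(s) for s in strings]
-- ===== SOURCE B (Python) =====
-- def solution(strings):
--     def make_lexicographically_smallest(s: str) -> str:
--         # repeatedly splice out the first "110" occurrence ('110' never overlaps itself)
--         t = s
--         while True:
--             i = t.find("110")
--             if i == -1:
--                 break
--             t = t[:i] + t[i + 3:]
--         count = (len(s) - len(t)) // 3  # each removal dropped exactly 3 chars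
--         k = t.rfind("0") + 1           # 0 when there is no '0': bundle goes to the front
--         return t[:k] + "110" * count + t[k:]
--
--     return [make_lexicographically_smallest(s) for s in strings]
-- ===== Notes on version B (the rewrite author's own statement) =====
-- stated objective: alternative
-- what changed: Replaces the single-pass Python-level stack removal with a repeated find-first-'110'-and-splice loop (valid since '110' never overlaps itself), recovers the removed count as the length difference divided by 3, and merges the two reinsertion branches into one splice at rfind('0')+1 (0 when absent).
import Mathlib
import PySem

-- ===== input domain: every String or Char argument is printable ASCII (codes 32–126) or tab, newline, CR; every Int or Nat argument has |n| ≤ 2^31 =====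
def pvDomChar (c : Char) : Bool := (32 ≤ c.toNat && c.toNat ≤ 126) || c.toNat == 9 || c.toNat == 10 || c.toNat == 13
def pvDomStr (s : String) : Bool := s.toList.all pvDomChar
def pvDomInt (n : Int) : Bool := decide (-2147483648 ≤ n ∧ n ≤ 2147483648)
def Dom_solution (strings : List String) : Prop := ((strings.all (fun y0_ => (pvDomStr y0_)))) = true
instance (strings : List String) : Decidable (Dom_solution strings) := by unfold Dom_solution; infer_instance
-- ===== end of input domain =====

-- B re-implements the '110' removal by repeated find-and-splice instead of a stack and merges the
-- two reinsertion branches; equal return value on every input (alternative decomposition, no speed claim).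

-- ===== PORT A =====
-- one loop step: push ch; if the stack now ends with "110", delete those 3 and count one removal
-- (stack[-3:] == ['1','1','0'] is checked as reverse.take 3 = ['0','1','1']; the len >= 3 guard is
-- implied since take 3 can only equal a 3-element list when the stack has >= 3 elements)
def pvStepA (p : List Char × Nat) (ch : Char) : List Char × Nat :=
  let st := p.1 ++ [ch]
  if st.reverse.take 3 = ['0', '1', '1']
  then ((st.reverse.drop 3).reverse, p.2 + 1)
  else (st, p.2)

def pvMakeSmallestA (s : List Char) : List Char :=
  let p := s.foldl pvStepA ([], 0)
  let remaining := p.1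
  let insertAfter := PySem.Chars.rfind remaining ['0']
  let bundle := PySem.List.pyRepeat ['1', '1', '0'] (p.2 : Int)   -- "110" * count_110
  if insertAfter = -1 then bundle ++ remaining
  else -- slices exact here: insertAfter + 1 ≥ 0 (PySem.List.slice_to / slice_from)
    remaining.take (insertAfter + 1).toNat ++ bundle ++ remaining.drop (insertAfter + 1).toNat

def solution (strings : List String) : List String :=
  strings.map (fun s => String.ofList (pvMakeSmallestA s.toList))

-- ===== PORT B =====
-- the while loop: splice out the first occurrence of "110" until none is left.
-- fuel = the string's length bounds the number of iterations (each removes 3 chars);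
-- it only makes the loop total and is never exhausted on the loop's own runs
def pvRemove110Go : Nat → List Char → List Char
  | 0, t => t
  | fuel + 1, t =>
    let i := PySem.Chars.find t ['1', '1', '0']
    if i = -1 then t
    else -- i ≥ 0 here, so t[:i] + t[i+3:] is take/drop (PySem.List.slice_to / slice_from)
      pvRemove110Go fuel (t.take i.toNat ++ t.drop (i.toNat + 3))

def pvRemove110 (t : List Char) : List Char := pvRemove110Go t.length t

def pvMakeSmallestB (s : List Char) : List Char :=
  let t := pvRemove110 s
  let count := PySem.Int.floordiv ((s.length : Int) - (t.length : Int)) 3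
  let k := PySem.Chars.rfind t ['0'] + 1
  t.take k.toNat ++ PySem.List.pyRepeat ['1', '1', '0'] count ++ t.drop k.toNat

def solution_alt (strings : List String) : List String :=
  strings.map (fun s => String.ofList (pvMakeSmallestB s.toList))

-- ===== PRECONDITION & SPEC =====
def Spec_solution (strings : List String) (out : List String) : Prop := out = solution_alt strings
instance (strings : List String) (out : List String) : Decidable (Spec_solution strings out) := by unfold Spec_solution; infer_instance

-- ===== CLAIM (what is proved, stated in full; the proofs are below) =====
def Claim_equal_solution : Prop := ∀ (strings : List String), Dom_solution strings → Spec_solution strings (solution strings)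

-- ===== LEMMAS AND PROOFS =====

-- the pop condition means the stack ends with "110", and the pop restores the part before it
theorem pv_cond_suffix (l : List Char) (h : l.reverse.take 3 = ['0', '1', '1']) :
    l = (l.reverse.drop 3).reverse ++ ['1', '1', '0'] := by
  conv_lhs => rw [← l.reverse_reverse, ← List.take_append_drop 3 l.reverse, h]
  simp

-- pushing '1' never pops
theorem pv_step_one (st : List Char) (c : Nat) : pvStepA (st, c) '1' = (st ++ ['1'], c) := by
  simp only [pvStepA, List.reverse_append, List.reverse_singleton, List.singleton_append]
  split
  · rename_i h
    exact absurd (List.cons.injEq .. ▸ h).1 (by decide)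
  · rfl

-- processing "110" from any state pops back to the same stack, counting one removal
theorem pv_fold_110 (st : List Char) (c : Nat) (v : List Char) :
    List.foldl pvStepA (st, c) (['1', '1', '0'] ++ v) = List.foldl pvStepA (st, c + 1) v := by
  have h1 := pv_step_one st c
  have h2 := pv_step_one (st ++ ['1']) c
  simp only [List.cons_append, List.nil_append, List.foldl_cons, h1, h2]
  have h3 : pvStepA (st ++ ['1'] ++ ['1'], c) '0' = (st, c + 1) := by
    simp [pvStepA, List.reverse_append]
  rw [h3]

theorem pvStepA_eq (st : List Char) (c : Nat) (a : Char) :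
    pvStepA (st, c) a
      = if (st ++ [a]).reverse.take 3 = ['0', '1', '1']
        then (((st ++ [a]).reverse.drop 3).reverse, c + 1) else (st ++ [a], c) := rfl

-- the stack component does not depend on the count
theorem pv_fold_fst (l : List Char) : ∀ (st : List Char) (c c' : Nat),
    (List.foldl pvStepA (st, c) l).1 = (List.foldl pvStepA (st, c') l).1 := by
  induction l with
  | nil => intro st c c'; rfl
  | cons a t ih =>
    intro st c c'
    simp only [List.foldl_cons, pvStepA_eq]
    split <;> exact ih _ _ _

-- length invariant: 3 * count + stack length tracks the processed length
theorem pv_fold_len (l : List Char) : ∀ (st : List Char) (c : Nat),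
    3 * (List.foldl pvStepA (st, c) l).2 + (List.foldl pvStepA (st, c) l).1.length
      = 3 * c + st.length + l.length := by
  induction l with
  | nil => intro st c; simp
  | cons a t ih =>
    intro st c
    simp only [List.foldl_cons, pvStepA_eq]
    split
    · rename_i h
      rw [ih]
      have h3 : 3 ≤ st.length + 1 := by
        have hl := congrArg List.length h
        simp only [List.length_take, List.length_reverse, List.length_append,
          List.length_cons, List.length_nil] at hl
        omega
      simp only [List.length_reverse, List.length_drop, List.length_append,
        List.length_cons, List.length_nil]
      omega
    · rw [ih]
      simp only [List.length_append, List.length_cons, List.length_nil]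
      omega

-- splicing out first "110" occurrences does not change the stack result (any fuel)
theorem pv_fold_remove_go (fuel : Nat) : ∀ (t st : List Char) (c c' : Nat),
    (List.foldl pvStepA (st, c) t).1 = (List.foldl pvStepA (st, c') (pvRemove110Go fuel t)).1 := by
  induction fuel with
  | zero => intro t st c c'; exact pv_fold_fst t st c c'
  | succ fuel ih =>
    intro t st c c'
    by_cases hi' : PySem.Chars.find t ['1', '1', '0'] = -1
    · rw [show pvRemove110Go (fuel + 1) t = t by rw [pvRemove110Go]; simp [hi']]
      exact pv_fold_fst t st c c'
    · have h0 : 0 ≤ PySem.Chars.find t ['1', '1', '0'] := by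
        have := PySem.Chars.neg_one_le_find t ['1', '1', '0']
        omega
      obtain ⟨w, hw⟩ := (PySem.Chars.find_spec (s := t) (sub := ['1', '1', '0']) h0).1
      have hdrop3 : t.drop ((PySem.Chars.find t ['1', '1', '0']).toNat + 3) = w := by
        have h2 : (t.drop (PySem.Chars.find t ['1', '1', '0']).toNat).drop 3 = w := by
          rw [← hw]; rfl
        rw [List.drop_drop] at h2
        exact h2
      have hsplit : t = t.take (PySem.Chars.find t ['1', '1', '0']).toNat ++ (['1', '1', '0'] ++ w) := by
        conv_lhs => rw [← List.take_append_drop (PySem.Chars.find t ['1', '1', '0']).toNat t, ← hw]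
      have hrec : pvRemove110Go (fuel + 1) t
          = pvRemove110Go fuel (t.take (PySem.Chars.find t ['1', '1', '0']).toNat ++ w) := by
        conv_lhs => rw [pvRemove110Go]
        simp only [hi', if_false, hdrop3]
      rw [hrec]
      calc (List.foldl pvStepA (st, c) t).1
          = (List.foldl pvStepA
              (List.foldl pvStepA (st, c) (t.take (PySem.Chars.find t ['1', '1', '0']).toNat))
              (['1','1','0'] ++ w)).1 := by
            conv_lhs => rw [hsplit]
            rw [List.foldl_append]
        _ = (List.foldl pvStepA (st, c) (t.take (PySem.Chars.find t ['1', '1', '0']).toNat ++ w)).1 := by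
            rcases hst : List.foldl pvStepA (st, c)
                (t.take (PySem.Chars.find t ['1', '1', '0']).toNat) with ⟨st1, c1⟩
            rw [pv_fold_110]
            rw [List.foldl_append]
            rw [hst]
            exact pv_fold_fst w st1 (c1 + 1) c1
        _ = _ := ih _ st c c'

theorem pv_fold_remove (s : List Char) (st : List Char) (c c' : Nat) :
    (List.foldl pvStepA (st, c) s).1 = (List.foldl pvStepA (st, c') (pvRemove110 s)).1 :=
  pv_fold_remove_go s.length s st c c'

-- with enough fuel the loop result contains no "110"
theorem pv_remove_no110_go (fuel : Nat) : ∀ (t : List Char), t.length ≤ 3 * fuel + 2 →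
    ¬ (['1', '1', '0'] <:+: pvRemove110Go fuel t) := by
  induction fuel with
  | zero =>
    intro t hlen hinf
    have := hinf.length_le
    simp only [List.length_cons, List.length_nil] at this
    simp only [pvRemove110Go] at this
    omega
  | succ fuel ih =>
    intro t hlen
    by_cases hi' : PySem.Chars.find t ['1', '1', '0'] = -1
    · rw [show pvRemove110Go (fuel + 1) t = t by rw [pvRemove110Go]; simp [hi']]
      exact (PySem.Chars.find_eq_neg_one_iff (s := t) (sub := ['1', '1', '0'])).1 hi'
    · have h0 : 0 ≤ PySem.Chars.find t ['1', '1', '0'] := by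
        have := PySem.Chars.neg_one_le_find t ['1', '1', '0']
        omega
      have hsp := (PySem.Chars.find_spec (s := t) (sub := ['1', '1', '0']) h0).1
      have hle : (PySem.Chars.find t ['1', '1', '0']).toNat + 3 ≤ t.length := by
        have := hsp.length_le
        simp only [List.length_drop, List.length_cons, List.length_nil] at this
        omega
      have hrec : pvRemove110Go (fuel + 1) t
          = pvRemove110Go fuel (t.take (PySem.Chars.find t ['1', '1', '0']).toNat
              ++ t.drop ((PySem.Chars.find t ['1', '1', '0']).toNat + 3)) := by
        conv_lhs => rw [pvRemove110Go]
        simp only [hi', if_false]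
      rw [hrec]
      apply ih
      simp only [List.length_append, List.length_take, List.length_drop]
      omega

theorem pv_remove_no110 (s : List Char) : ¬ (['1', '1', '0'] <:+: pvRemove110 s) :=
  pv_remove_no110_go s.length s (by omega)

-- folding a "110"-free string over an empty stack just copies it
theorem pv_fold_no110 (r : List Char) : ∀ (st : List Char) (c : Nat),
    ¬ (['1', '1', '0'] <:+: st ++ r) → List.foldl pvStepA (st, c) r = (st ++ r, c) := by
  induction r with
  | nil => intro st c _; simp
  | cons a t ih =>
    intro st c hno
    simp only [List.foldl_cons, pvStepA_eq]
    split
    · rename_i h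
      exfalso
      apply hno
      refine ⟨(((st ++ [a]).reverse.drop 3).reverse), t, ?_⟩
      have := pv_cond_suffix (st ++ [a]) h
      rw [← this]
      simp
    · have : st ++ a :: t = (st ++ [a]) ++ t := by simp
      rw [this] at hno
      rw [ih (st ++ [a]) c hno, this]

-- A's remaining string is exactly B's loop result
theorem pv_stack_eq_remove (s : List Char) :
    (List.foldl pvStepA (([] : List Char), 0) s).1 = pvRemove110 s := by
  rw [pv_fold_remove s [] 0 0]
  rw [pv_fold_no110 (pvRemove110 s) [] 0 (by simpa using pv_remove_no110 s)]
  simp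

-- A's removal count is exactly B's length-difference count
theorem pv_count_eq (s : List Char) :
    ((List.foldl pvStepA (([] : List Char), 0) s).2 : Int)
      = PySem.Int.floordiv ((s.length : Int) - ((pvRemove110 s).length : Int)) 3 := by
  have hlen := pv_fold_len s [] 0
  rw [pv_stack_eq_remove s] at hlen
  simp only [List.length_nil] at hlen
  have hd : (s.length : Int) - ((pvRemove110 s).length : Int)
      = 3 * ((List.foldl pvStepA (([] : List Char), 0) s).2 : Int) := by
    omega
  rw [hd, PySem.Int.floordiv_eq_ediv_of_pos (by norm_num)]
  rw [Int.mul_ediv_cancel_left _ (by norm_num)]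

theorem pv_smallest_eq (s : List Char) : pvMakeSmallestA s = pvMakeSmallestB s := by
  simp only [pvMakeSmallestA, pvMakeSmallestB]
  rw [← pv_count_eq s, ← pv_stack_eq_remove s]
  by_cases hjn : PySem.Chars.rfind (List.foldl pvStepA (([] : List Char), 0) s).1 ['0'] = -1
  · rw [if_pos hjn, hjn]
    norm_num
  · rw [if_neg hjn]

theorem solution_spec : Claim_equal_solution := by
  intro strings _
  unfold Spec_solution solution solution_alt
  exact List.map_congr_left (fun s _ => congrArg String.ofList (pv_smallest_eq s.toList))
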